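-- pv_equiv track=rewrite | github.com/mdakram28/leetcode-archive | my-folder/problems/sum_of_matrix_after_queries/solution.py | matrixSumQueries
-- ===== SOURCE A (Python) =====
-- from typing import List
--
-- def matrixSumQueries(n: int, queries: List[List[int]]) -> int:
--
--     nq = len(queries)
--
--     countr = 0
--     countc = 0
--     # rows_updated = [0] * nq
--     # cols_updated = [0] * nq
--
--     col_updated = [False] * n
--     row_updated = [False] * n
--
--     total = 0
--
--     for qi in range(nq-1, -1, -1):
--         # rows_updated[qi] = countr
--         # cols_updated[qi] = countc
--
--         if queries[qi][0] == 0: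
--             if row_updated[queries[qi][1]]: continue
--             row_updated[queries[qi][1]] = True
--             total += queries[qi][2] * (n-countc)
--             countr += 1
--         else:
--             if col_updated[queries[qi][1]]: continue
--             col_updated[queries[qi][1]] = True
--             total += queries[qi][2] * (n-countr)
--             countc += 1
--
--     return total
-- ===== SOURCE B (Python) =====
-- def matrixSumQueries(n, queries):
--     # Forward two-pass scan: record the last write time of every row and
--     # column, then walk the queries forward; a query counts iff it is the
--     # final write to its line, and it contributes its value once for each
--     # of the n cells of that line not overwritten by a later crossing line.
--     row_last = [None] * n
--     col_last = [None] * n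
--     for t, q in enumerate(queries):
--         if q[0] == 0:
--             row_last[q[1]] = t
--         else:
--             col_last[q[1]] = t
--     nrows = sum(x is not None for x in row_last)
--     ncols = sum(x is not None for x in col_last)
--     total = 0
--     rseen = 0
--     cseen = 0
--     for t, q in enumerate(queries):
--         if q[0] == 0:
--             if row_last[q[1]] == t:
--                 total += q[2] * (n - ncols + cseen)
--                 rseen += 1
--         else:
--             if col_last[q[1]] == t:
--                 total += q[2] * (n - nrows + rseen)
--                 cseen += 1
--     return total
-- ===== Notes on version B (the rewrite author's own statement) =====
-- stated objective: alternative
-- what changed: B replaces A's reverse first-seen dedup pass by a forward two-pass scan: it records the last write time of every row and column, then walks the queries forward, counting a query iff it is the final write to its line and weighting its value by the number of its cells not overwritten by a later crossing line; Pre_ excludes exactly the inputs on which A raises IndexError (a query shorter than 2 entries, an index outside [-n,n), or a length-2 query that is the final write to its line), where B raises as well.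
import Mathlib
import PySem

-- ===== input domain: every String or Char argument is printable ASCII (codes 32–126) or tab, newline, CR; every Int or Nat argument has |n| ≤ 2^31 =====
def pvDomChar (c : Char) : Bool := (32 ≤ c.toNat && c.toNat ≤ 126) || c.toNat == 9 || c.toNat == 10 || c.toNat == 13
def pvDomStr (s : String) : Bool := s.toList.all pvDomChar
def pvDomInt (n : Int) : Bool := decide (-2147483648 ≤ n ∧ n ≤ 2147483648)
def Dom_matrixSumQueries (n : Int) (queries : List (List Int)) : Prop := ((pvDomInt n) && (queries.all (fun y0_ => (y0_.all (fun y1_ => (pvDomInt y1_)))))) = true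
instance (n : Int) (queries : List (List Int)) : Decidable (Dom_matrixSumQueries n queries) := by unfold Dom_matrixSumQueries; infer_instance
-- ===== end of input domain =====

-- B replaces A's reverse first-seen dedup pass by a forward two-pass scan over
-- last-write timestamps of every row and column; objective: alternative (same cost).

-- Python's list index normalisation on a list of length nn (negative = from the end)
def jdx (nn : Nat) (i : Int) : Nat := if 0 ≤ i then i.toNat else nn - (-i).toNat

-- ===== PORT A =====
-- state: (countr, countc, col_updated, row_updated, total); none = an exception was raised
def aStep (n : Int) (st : Option (Int × Int × List Bool × List Bool × Int)) (q : List Int) :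
    Option (Int × Int × List Bool × List Bool × Int) :=
  match st with
  | none => none
  | some (countr, countc, colU, rowU, total) =>
    match PySem.List.pyGet? q 0 with
    | none => none
    | some t =>
      match PySem.List.pyGet? q 1 with
      | none => none
      | some i =>
        if t = 0 then
          match PySem.List.pyGet? rowU i with
          | none => none
          | some b =>
            if b then some (countr, countc, colU, rowU, total)
            else
              match PySem.List.pySet? rowU i true, PySem.List.pyGet? q 2 with
              | some rowU', some v => some (countr + 1, countc, colU, rowU', total + v * (n - countc))
              | _, _ => none
        else
          match PySem.List.pyGet? colU i with
          | none => none
          | some b =>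
            if b then some (countr, countc, colU, rowU, total)
            else
              match PySem.List.pySet? colU i true, PySem.List.pyGet? q 2 with
              | some colU', some v => some (countr, countc + 1, colU', rowU, total + v * (n - countr))
              | _, _ => none

def matrixSumQueries (n : Int) (queries : List (List Int)) : Int :=
  -- for qi in range(nq-1, -1, -1): process queries[qi]  ⇒ fold over queries.reverse
  match queries.reverse.foldl (aStep n)
      (some (0, 0, List.replicate n.toNat false, List.replicate n.toNat false, 0)) with
  | some (_, _, _, _, total) => total
  | none => 0

-- ===== PORT B =====
-- pass 1: for t, q in enumerate(queries): (row_last if q[0]==0 else col_last)[q[1]] = t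
def bP1 (st : Option (List (Option Int) × List (Option Int))) (p : Int × List Int) :
    Option (List (Option Int) × List (Option Int)) :=
  match st with
  | none => none
  | some (rowL, colL) =>
    match PySem.List.pyGet? p.2 0, PySem.List.pyGet? p.2 1 with
    | some t0, some i =>
      if t0 = 0 then
        match PySem.List.pySet? rowL i (some p.1) with
        | some rowL' => some (rowL', colL)
        | none => none
      else
        match PySem.List.pySet? colL i (some p.1) with
        | some colL' => some (rowL, colL')
        | none => none
    | _, _ => none

-- pass 2: survivors contribute; state (total, rseen, cseen)
def bP2 (n nrows ncols : Int) (rowL colL : List (Option Int))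
    (st : Option (Int × Int × Int)) (p : Int × List Int) : Option (Int × Int × Int) :=
  match st with
  | none => none
  | some (total, rs, cs) =>
    match PySem.List.pyGet? p.2 0, PySem.List.pyGet? p.2 1 with
    | some t0, some i =>
      if t0 = 0 then
        match PySem.List.pyGet? rowL i with
        | none => none
        | some e =>
          if e = some p.1 then
            match PySem.List.pyGet? p.2 2 with
            | some v => some (total + v * (n - ncols + cs), rs + 1, cs)
            | none => none
          else some (total, rs, cs)
      else
        match PySem.List.pyGet? colL i with
        | none => none
        | some e =>
          if e = some p.1 then
            match PySem.List.pyGet? p.2 2 with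
            | some v => some (total + v * (n - nrows + rs), rs, cs + 1)
            | none => none
          else some (total, rs, cs)
    | _, _ => none

def matrixSumQueries_alt (n : Int) (queries : List (List Int)) : Int :=
  match (PySem.List.enumerate queries 0).foldl bP1
      (some (List.replicate n.toNat none, List.replicate n.toNat none)) with
  | none => 0
  | some (rowL, colL) =>
    let nrows : Int := (rowL.countP Option.isSome : Int)
    let ncols : Int := (colL.countP Option.isSome : Int)
    match (PySem.List.enumerate queries 0).foldl (bP2 n nrows ncols rowL colL) (some (0, 0, 0)) with
    | some (total, _, _) => total
    | none => 0

-- ===== PRECONDITION & SPEC =====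
-- q' and q address the same line of the matrix (same query type, same normalised index)
def sameLine (nn : Nat) (q' q : List Int) : Prop :=
  ((q'.getD 0 0 = 0) ↔ (q.getD 0 0 = 0)) ∧ jdx nn (q'.getD 1 0) = jdx nn (q.getD 1 0)

-- Pre_ excludes exactly the inputs on which A raises IndexError: a query with fewer than
-- 2 entries, an index outside [-n, n), or a length-2 query that is the final write to its
-- line (A then reads its missing third entry); B raises on exactly the same inputs.
def Pre_matrixSumQueries (n : Int) (queries : List (List Int)) : Prop :=
  ∀ k < queries.length,
    2 ≤ (queries.getD k []).length ∧
    -n ≤ (queries.getD k []).getD 1 0 ∧ (queries.getD k []).getD 1 0 < n ∧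
    (3 ≤ (queries.getD k []).length ∨
      ∃ m < queries.length, k < m ∧ sameLine n.toNat (queries.getD m []) (queries.getD k []))
instance (n : Int) (queries : List (List Int)) : Decidable (Pre_matrixSumQueries n queries) := by
  unfold Pre_matrixSumQueries sameLine; infer_instance

def pvWitness_matrixSumQueries : Int × List (List Int) := (2, [[0, 0, 3], [1, 1, -2]])

def Spec_matrixSumQueries (n : Int) (queries : List (List Int)) (out : Int) : Prop := out = matrixSumQueries_alt n queries
instance (n : Int) (queries : List (List Int)) (out : Int) : Decidable (Spec_matrixSumQueries n queries out) := by unfold Spec_matrixSumQueries; infer_instance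

-- ===== CLAIM (what is proved, stated in full; the proofs are below) =====
def Claim_equal_matrixSumQueries : Prop := ∀ (n : Int) (queries : List (List Int)), Dom_matrixSumQueries n queries → Pre_matrixSumQueries n queries → Spec_matrixSumQueries n queries (matrixSumQueries n queries)

-- ===== LEMMAS AND PROOFS =====

theorem jdx_lt {nn : Nat} {i : Int} (h1 : -(nn : Int) ≤ i) (h2 : i < nn) : jdx nn i < nn := by
  unfold jdx; split <;> omega
theorem pyIdx_ok {nn : Nat} {i : Int} (h1 : -(nn : Int) ≤ i) (h2 : i < nn) :
    PySem.List.pyIdx? nn i = some (jdx nn i) := by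
  simp only [PySem.List.pyIdx?, jdx]; split <;> simp
theorem pyGet_ok {α : Type} {xs : List α} {nn : Nat} {i : Int} (d : α) (hl : xs.length = nn)
    (h1 : -(nn : Int) ≤ i) (h2 : i < nn) :
    PySem.List.pyGet? xs i = some (xs.getD (jdx nn i) d) := by
  have hj : jdx nn i < nn := jdx_lt h1 h2
  simp [PySem.List.pyGet?, hl, pyIdx_ok h1 h2, List.getD, List.getElem?_eq_getElem (by omega : jdx nn i < xs.length)]
theorem pySet_ok {α : Type} {xs : List α} {nn : Nat} {i : Int} (v : α) (hl : xs.length = nn)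
    (h1 : -(nn : Int) ≤ i) (h2 : i < nn) :
    PySem.List.pySet? xs i v = some (xs.set (jdx nn i) v) := by
  subst hl
  simp [PySem.List.pySet?, pyIdx_ok h1 h2]
theorem pyGetq_ok (q : List Int) (k : Nat) (hk : k < q.length) :
    PySem.List.pyGet? q (k : Int) = some (q.getD k 0) := by
  simp [PySem.List.pyGet?_natCast, List.getD, List.getElem?_eq_getElem hk]
theorem pyGetq_ok' (q : List Int) (k : Nat) (ki : Int) (hki : ki = (k : Int))
    (hk : k < q.length) : PySem.List.pyGet? q ki = some (q.getD k 0) := by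
  rw [hki]; exact pyGetq_ok q k hk

-- normalised query: (is-row, normalised index, value)
def normQ (nn : Nat) (q : List Int) : Bool × Nat × Int :=
  (decide (q.getD 0 0 = 0), jdx nn (q.getD 1 0), q.getD 2 0)
-- some query in s writes line (b, r)
def hasLine (b : Bool) (s : List (Bool × Nat × Int)) (r : Nat) : Bool :=
  s.any fun e => e.1 == b && e.2.1 == r
-- number of distinct lines of kind b written by s
def dL (b : Bool) (nn : Nat) (s : List (Bool × Nat × Int)) : Int :=
  ((List.range nn).countP (hasLine b s) : Int)
-- the common value of both programs, by recursion on the query list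
def T (nn : Nat) (n : Int) : List (Bool × Nat × Int) → Int
  | [] => 0
  | e :: s => T nn n s + (if hasLine e.1 s e.2.1 then 0 else e.2.2 * (n - dL (!e.1) nn s))
-- timestamp of the last write of kind b to line r, times starting at t0
def lastW (b : Bool) : List (Bool × Nat × Int) → Int → Nat → Option Int
  | [], _, _ => none
  | e :: s, t0, r =>
    match lastW b s (t0 + 1) r with
    | some u => some u
    | none => if e.1 == b && e.2.1 == r then some t0 else none
def mapRange {α : Type} (nn : Nat) (f : Nat → α) : List α := (List.range nn).map f

def elemOK (n : Int) (nn : Nat) (q : List Int) (s : List (List Int)) : Prop :=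
  2 ≤ q.length ∧ -n ≤ q.getD 1 0 ∧ q.getD 1 0 < n ∧
  (3 ≤ q.length ∨ ∃ q' ∈ s, sameLine nn q' q)
def SufOK (n : Int) (nn : Nat) : List (List Int) → Prop
  | [] => True
  | q :: s => elemOK n nn q s ∧ SufOK n nn s

theorem mapRange_length {α : Type} (nn : Nat) (f : Nat → α) : (mapRange nn f).length = nn := by
  simp [mapRange]
theorem mapRange_getD {α : Type} {nn r : Nat} (f : Nat → α) (d : α) (hr : r < nn) :
    (mapRange nn f).getD r d = f r := by
  simp [mapRange, List.getD, List.getElem?_map, List.getElem?_range hr]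
theorem mapRange_congr {α : Type} {nn : Nat} {f g : Nat → α} (h : ∀ r < nn, f r = g r) :
    mapRange nn f = mapRange nn g := by
  unfold mapRange
  exact List.map_congr_left (fun r hr => h r (List.mem_range.mp hr))
theorem mapRange_set {α : Type} {nn j : Nat} (f : Nat → α) (v : α) (hj : j < nn) :
    (mapRange nn f).set j v = mapRange nn (fun r => if r = j then v else f r) := by
  apply List.ext_getElem
  · simp [mapRange]
  · intro i h1 h2
    have hi : i < nn := by simpa [mapRange] using h2
    simp only [mapRange, List.getElem_set, List.getElem_map, List.getElem_range]
    by_cases hij : i = j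
    · simp [hij]
    · simp [hij, Ne.symm hij]
theorem mapRange_const {α : Type} (nn : Nat) (c : α) :
    mapRange nn (fun _ => c) = List.replicate nn c := by
  simp [mapRange, List.map_const']

theorem hasLine_cons (b : Bool) (e : Bool × Nat × Int) (s : List (Bool × Nat × Int)) (r : Nat) :
    hasLine b (e :: s) r = ((e.1 == b && e.2.1 == r) || hasLine b s r) := by
  simp [hasLine]
theorem hasLine_nil (b : Bool) (r : Nat) : hasLine b [] r = false := rfl

theorem countP_or_point (l : List Nat) (p : Nat → Bool) (j : Nat) (hp : p j = false) :
    l.countP (fun r => (j == r) || p r) = l.countP p + l.count j := by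
  induction l with
  | nil => rfl
  | cons x xs ih =>
    by_cases hx : x = j
    · subst hx
      simp [List.countP_cons, List.count_cons, hp, ih]
      omega
    · simp [List.countP_cons, List.count_cons, ih, show (j == x) = false by simp [Ne.symm hx], hx]
      omega

theorem dL_cons_match_new {b : Bool} {e : Bool × Nat × Int} {s : List (Bool × Nat × Int)} {nn : Nat}
    (hb : e.1 = b) (hnew : hasLine b s e.2.1 = false) (hlt : e.2.1 < nn) :
    dL b nn (e :: s) = dL b nn s + 1 := by
  unfold dL
  have h1 : (List.range nn).countP (hasLine b (e :: s))
      = (List.range nn).countP (fun r => (e.2.1 == r) || hasLine b s r) := by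
    apply List.countP_congr
    intro r _
    simp [hasLine_cons, hb]
  rw [h1, countP_or_point _ _ _ hnew, List.count_range, if_pos hlt]
  push_cast; ring
theorem dL_cons_match_old {b : Bool} {e : Bool × Nat × Int} {s : List (Bool × Nat × Int)} {nn : Nat}
    (hold : hasLine b s e.2.1 = true) :
    dL b nn (e :: s) = dL b nn s := by
  unfold dL
  congr 1
  apply List.countP_congr
  intro r _
  rw [hasLine_cons]
  by_cases hr : e.2.1 = r
  · subst hr; simp [hold]
  · simp [show (e.2.1 == r) = false by simp [hr], Bool.and_false]
theorem dL_cons_mismatch {b : Bool} {e : Bool × Nat × Int} {s : List (Bool × Nat × Int)} {nn : Nat}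
    (hb : e.1 ≠ b) :
    dL b nn (e :: s) = dL b nn s := by
  unfold dL
  congr 1
  apply List.countP_congr
  intro r _
  simp [hasLine_cons, show (e.1 == b) = false by simp [hb]]
theorem dL_nil (b : Bool) (nn : Nat) : dL b nn [] = 0 := by
  simp [dL, hasLine_nil]

theorem lastW_ge {b : Bool} {s : List (Bool × Nat × Int)} {t0 : Int} {r : Nat} {u : Int}
    (h : lastW b s t0 r = some u) : t0 ≤ u := by
  induction s generalizing t0 u with
  | nil => simp [lastW] at h
  | cons e s ih =>
    rw [lastW] at h
    cases hrec : lastW b s (t0 + 1) r with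
    | none =>
      rw [hrec] at h
      simp only at h
      split at h
      · injection h with h'; omega
      · exact absurd h (by simp)
    | some u' =>
      rw [hrec] at h
      simp only at h
      injection h with h'
      have := ih hrec
      omega

theorem lastW_isSome (b : Bool) (s : List (Bool × Nat × Int)) (t0 : Int) (r : Nat) :
    (lastW b s t0 r).isSome = hasLine b s r := by
  induction s generalizing t0 with
  | nil => simp [lastW, hasLine]
  | cons e s ih =>
    rw [lastW, hasLine, List.any_cons, ← show hasLine b s r = s.any _ from rfl, ← ih (t0 + 1)]
    rcases lastW b s (t0 + 1) r with _ | u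
    · simp only [Option.isSome_none, Bool.or_false]
      split <;> simp_all
    · simp

theorem lastW_append (b : Bool) (p s : List (Bool × Nat × Int)) (t0 : Int) (r : Nat) :
    lastW b (p ++ s) t0 r =
      match lastW b s (t0 + p.length) r with
      | some u => some u
      | none => lastW b p t0 r := by
  induction p generalizing t0 with
  | nil =>
    simp only [List.nil_append, List.length_nil, Nat.cast_zero, add_zero]
    rcases h : lastW b s t0 r with _ | u <;> simp [h, lastW]
  | cons e p ih =>
    rw [List.cons_append, lastW, ih (t0 + 1), lastW]
    have harith : t0 + 1 + (p.length : Int) = t0 + ((e :: p).length : Int) := by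
      simp; ring
    rw [harith]
    rcases lastW b s (t0 + ((e :: p).length : Int)) r with _ | u
    · simp
    · simp

theorem lastW_snoc (b : Bool) (s : List (Bool × Nat × Int)) (e : Bool × Nat × Int)
    (t0 : Int) (r : Nat) :
    lastW b (s ++ [e]) t0 r =
      if e.1 == b && e.2.1 == r then some (t0 + s.length) else lastW b s t0 r := by
  rw [lastW_append]
  have h1 : lastW b [e] (t0 + s.length) r
      = if e.1 == b && e.2.1 == r then some (t0 + s.length) else none := by
    rw [lastW]; rfl
  rw [h1]
  by_cases hc : (e.1 == b && e.2.1 == r) = true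
  · simp [hc]
  · simp [hc]

-- Pre_ bridges
theorem pre_suf {n : Int} {qs : List (List Int)} (h : Pre_matrixSumQueries n qs) : SufOK n n.toNat qs := by
  induction qs with
  | nil => trivial
  | cons q s ih =>
    constructor
    · obtain ⟨h1, h2, h3, h4⟩ := h 0 (by simp)
      rw [List.getD_cons_zero] at h1 h2 h3
      refine ⟨h1, h2, h3, ?_⟩
      rcases h4 with h4 | ⟨m, hm, h0m, hsame⟩
      · left; rw [List.getD_cons_zero] at h4; exact h4
      · right
        obtain ⟨m', rfl⟩ : ∃ m', m = m' + 1 := ⟨m - 1, by omega⟩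
        have hm' : m' < s.length := by simp at hm; omega
        refine ⟨s.getD m' [], ?_, ?_⟩
        · rw [List.getD_eq_getElem s [] hm']; exact List.getElem_mem hm'
        · rw [List.getD_cons_succ, List.getD_cons_zero] at hsame
          exact hsame
    · apply ih
      intro k hk
      have h5 := h (k + 1) (by simp; omega)
      rw [List.getD_cons_succ] at h5
      obtain ⟨h1, h2, h3, h4⟩ := h5
      refine ⟨h1, h2, h3, ?_⟩
      rcases h4 with h4 | ⟨m, hm, hkm, hsame⟩
      · exact Or.inl h4
      · right
        obtain ⟨m', rfl⟩ : ∃ m', m = m' + 1 := ⟨m - 1, by omega⟩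
        rw [List.getD_cons_succ] at hsame
        exact ⟨m', by simp at hm; omega, by omega, hsame⟩

theorem suf_append {n : Int} {nn : Nat} {p s : List (List Int)} (h : SufOK n nn (p ++ s)) : SufOK n nn s := by
  induction p with
  | nil => exact h
  | cons q p ih => exact ih h.2

theorem suf_basic {n : Int} {nn : Nat} {qs : List (List Int)} (h : SufOK n nn qs) :
    ∀ q ∈ qs, 2 ≤ q.length ∧ -n ≤ q.getD 1 0 ∧ q.getD 1 0 < n := by
  induction qs with
  | nil => intro q hq; simp at hq
  | cons x s ih =>
    intro q hq
    rcases List.mem_cons.mp hq with hq | hq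
    · subst hq; exact ⟨h.1.1, h.1.2.1, h.1.2.2.1⟩
    · exact ih h.2 q hq

theorem sameLine_hasLine {nn : Nat} {q q' : List Int} {s : List (List Int)}
    (hmem : q' ∈ s) (hsame : sameLine nn q' q) :
    hasLine (decide (q.getD 0 0 = 0)) (s.map (normQ nn)) (jdx nn (q.getD 1 0)) = true := by
  obtain ⟨h1, h2⟩ := hsame
  rw [hasLine, List.any_eq_true]
  refine ⟨normQ nn q', List.mem_map_of_mem hmem, ?_⟩
  have e1 : (normQ nn q').1 = decide (q.getD 0 0 = 0) := by
    simp only [normQ]; exact decide_eq_decide.mpr h1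
  have e2 : (normQ nn q').2.1 = jdx nn (q.getD 1 0) := h2
  rw [e1, e2]
  simp

-- ===== pass 1 of B =====
theorem pass1_ok {n : Int} {nn : Nat} (hn : n = (nn : Int)) (qs : List (List Int))
    (hb : ∀ q ∈ qs, 2 ≤ q.length ∧ -n ≤ q.getD 1 0 ∧ q.getD 1 0 < n) :
    (PySem.List.enumerate qs 0).foldl bP1
        (some (List.replicate nn none, List.replicate nn none))
      = some (mapRange nn (lastW true (qs.map (normQ nn)) 0),
              mapRange nn (lastW false (qs.map (normQ nn)) 0)) := by
  induction qs using List.reverseRecOn with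
  | nil =>
    have hR : ∀ b : Bool, mapRange nn (lastW b (([] : List (List Int)).map (normQ nn)) 0)
        = List.replicate nn (none : Option Int) := by
      intro b
      rw [show (([] : List (List Int)).map (normQ nn)) = [] from rfl]
      exact (mapRange_congr (g := fun _ => (none : Option Int)) (fun r _ => rfl)).trans
        (mapRange_const nn none)
    rw [show PySem.List.enumerate ([] : List (List Int)) 0 = [] from rfl, List.foldl_nil,
      hR true, hR false]
  | append_singleton qs q ih =>
    obtain ⟨hl2, hi1, hi2⟩ := hb q (by simp)
    have hi1' : -(nn : Int) ≤ q.getD 1 0 := by rw [hn] at hi1; exact hi1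
    have hi2' : q.getD 1 0 < (nn : Int) := by rw [hn] at hi2; exact hi2
    have hjn : jdx nn (q.getD 1 0) < nn := jdx_lt hi1' hi2'
    rw [PySem.List.enumerate_append, List.foldl_append,
      ih (fun q' hq' => hb q' (by simp [hq'])),
      show PySem.List.enumerate [q] (0 + qs.length) = [(0 + (qs.length : Int), q)] by
        rw [PySem.List.enumerate_cons]; rfl,
      List.foldl_cons, List.foldl_nil]
    have h0 := pyGetq_ok' q 0 0 (by norm_num) (by omega)
    have h1 := pyGetq_ok' q 1 1 (by norm_num) (by omega)
    rw [bP1]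
    simp only [h0, h1]
    rw [List.map_append]
    by_cases ht : q.getD 0 0 = 0
    · rw [if_pos ht, pySet_ok _ (mapRange_length nn _) hi1' hi2',
        mapRange_set _ _ hjn]
      have hrow : mapRange nn (fun r => if r = jdx nn (q.getD 1 0)
            then some (0 + (qs.length : Int)) else lastW true (qs.map (normQ nn)) 0 r)
          = mapRange nn (lastW true (qs.map (normQ nn) ++ [normQ nn q]) 0) := by
        apply mapRange_congr
        intro r _
        rw [lastW_snoc]
        have hb1 : (normQ nn q).1 = true := by
          simp only [normQ]; exact decide_eq_true ht
        have e2 : (normQ nn q).2.1 = jdx nn (q.getD 1 0) := rfl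
        by_cases hr : r = jdx nn (q.getD 1 0)
        · rw [if_pos hr, if_pos (by
            have hbe : ((normQ nn q).2.1 == r) = true := by
              rw [e2, hr]; exact beq_self_eq_true _
            simp [hb1, hbe]), List.length_map]
        · rw [if_neg hr, if_neg (by
            have hbe : ((normQ nn q).2.1 == r) = false := by
              rw [e2]; exact beq_eq_false_iff_ne.mpr (Ne.symm hr)
            simp [hb1, hbe])]
      have hcol : mapRange nn (lastW false (qs.map (normQ nn)) 0)
          = mapRange nn (lastW false (qs.map (normQ nn) ++ [normQ nn q]) 0) := by
        apply mapRange_congr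
        intro r _
        rw [lastW_snoc, if_neg (by
          have hb1 : (normQ nn q).1 = true := by
            simp only [normQ]; exact decide_eq_true ht
          simp [hb1])]
      rw [hrow, hcol]
      rfl
    · rw [if_neg ht, pySet_ok _ (mapRange_length nn _) hi1' hi2',
        mapRange_set _ _ hjn]
      have hcol : mapRange nn (fun r => if r = jdx nn (q.getD 1 0)
            then some (0 + (qs.length : Int)) else lastW false (qs.map (normQ nn)) 0 r)
          = mapRange nn (lastW false (qs.map (normQ nn) ++ [normQ nn q]) 0) := by
        apply mapRange_congr
        intro r _
        rw [lastW_snoc]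
        have hb1 : (normQ nn q).1 = false := by
          simp only [normQ]; exact decide_eq_false ht
        have e2 : (normQ nn q).2.1 = jdx nn (q.getD 1 0) := rfl
        by_cases hr : r = jdx nn (q.getD 1 0)
        · rw [if_pos hr, if_pos (by
            have hbe : ((normQ nn q).2.1 == r) = true := by
              rw [e2, hr]; exact beq_self_eq_true _
            simp [hb1, hbe]), List.length_map]
        · rw [if_neg hr, if_neg (by
            have hbe : ((normQ nn q).2.1 == r) = false := by
              rw [e2]; exact beq_eq_false_iff_ne.mpr (Ne.symm hr)
            simp [hb1, hbe])]
      have hrow : mapRange nn (lastW true (qs.map (normQ nn)) 0)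
          = mapRange nn (lastW true (qs.map (normQ nn) ++ [normQ nn q]) 0) := by
        apply mapRange_congr
        intro r _
        rw [lastW_snoc, if_neg (by
          have hb1 : (normQ nn q).1 = false := by
            simp only [normQ]; exact decide_eq_false ht
          simp [hb1])]
      rw [hcol, hrow]
      rfl

-- the survivor test: the stored last-write time equals the current time iff no later
-- write hits the same line
theorem survivor_iff (b : Bool) (P s : List (Bool × Nat × Int))
    (e : Bool × Nat × Int) (hb : e.1 = b) (t0 : Int) :
    lastW b (P ++ e :: s) t0 e.2.1 = some (t0 + P.length) ↔ hasLine b s e.2.1 = false := by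
  rw [lastW_append, lastW]
  cases hrec : lastW b s (t0 + (P.length : Int) + 1) e.2.1 with
  | some u =>
    have hge := lastW_ge hrec
    have hsome : hasLine b s e.2.1 = true := by
      rw [← lastW_isSome b s (t0 + (P.length : Int) + 1), hrec]; rfl
    simp only [hsome]
    constructor
    · intro h; simp at h; omega
    · intro h; simp at h
  | none =>
    have hnone : hasLine b s e.2.1 = false := by
      rw [← lastW_isSome b s (t0 + (P.length : Int) + 1), hrec]; rfl
    simp [hnone, hb]

-- non-survivor: the stored time differs
theorem nonsurvivor_ne (b : Bool) (P s : List (Bool × Nat × Int))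
    (e : Bool × Nat × Int) (t0 : Int) {j : Nat}
    (h : hasLine b s j = true) :
    lastW b (P ++ e :: s) t0 j ≠ some (t0 + P.length) := by
  rw [lastW_append, lastW]
  have hsome : (lastW b s (t0 + (P.length : Int) + 1) j).isSome = true := by
    rw [lastW_isSome, h]
  obtain ⟨u, hu⟩ := Option.isSome_iff_exists.mp hsome
  have hge := lastW_ge hu
  rw [hu]
  simp only []
  intro hcontra
  have : u = t0 + (P.length : Int) := by simpa using hcontra
  omega

-- ===== pass 2 of B =====
theorem pass2_ok {n : Int} {nn : Nat} (hn : n = (nn : Int)) (full : List (List Int))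
    (Hsuf : SufOK n nn full)
    (nrows ncols : Int)
    (hnr : nrows = dL true nn (full.map (normQ nn)))
    (hnc : ncols = dL false nn (full.map (normQ nn))) :
    ∀ (s P : List (List Int)), full = P ++ s → ∀ (tot rs cs : Int),
    rs = nrows - dL true nn (s.map (normQ nn)) →
    cs = ncols - dL false nn (s.map (normQ nn)) →
    (PySem.List.enumerate s (P.length : Int)).foldl
        (bP2 n nrows ncols (mapRange nn (lastW true (full.map (normQ nn)) 0))
          (mapRange nn (lastW false (full.map (normQ nn)) 0)))
        (some (tot, rs, cs))
      = some (tot + T nn n (s.map (normQ nn)), nrows, ncols) := by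
  intro s
  induction s with
  | nil =>
    intro P hP tot rs cs hrs hcs
    rw [show PySem.List.enumerate ([] : List (List Int)) (P.length : Int) = [] from rfl,
      List.foldl_nil]
    rw [show (([] : List (List Int)).map (normQ nn)) = [] from rfl] at hrs hcs ⊢
    rw [show T nn n [] = 0 from rfl, dL_nil] at *
    rw [hrs, hcs]
    norm_num
  | cons q s ih =>
    intro P hP tot rs cs hrs hcs
    have hsufqs : SufOK n nn (q :: s) := suf_append (hP ▸ Hsuf)
    obtain ⟨⟨hl2, hi1, hi2, hdis⟩, hsufs⟩ := hsufqs
    have hi1' : -(nn : Int) ≤ q.getD 1 0 := by rw [hn] at hi1; exact hi1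
    have hi2' : q.getD 1 0 < (nn : Int) := by rw [hn] at hi2; exact hi2
    have hjn : jdx nn (q.getD 1 0) < nn := jdx_lt hi1' hi2'
    have h0 := pyGetq_ok' q 0 0 (by norm_num) (by omega)
    have h1 := pyGetq_ok' q 1 1 (by norm_num) (by omega)
    rw [PySem.List.enumerate_cons, List.foldl_cons]
    have hfullE : full.map (normQ nn) = P.map (normQ nn) ++ normQ nn q :: s.map (normQ nn) := by
      rw [hP]; simp
    by_cases ht : q.getD 0 0 = 0
    · -- row query
      have hb1 : (normQ nn q).1 = true := by
        simp only [normQ]; exact decide_eq_true ht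
      have hEget : PySem.List.pyGet? (mapRange nn (lastW true (full.map (normQ nn)) 0))
            (q.getD 1 0)
          = some (lastW true (full.map (normQ nn)) 0 ((normQ nn q).2.1)) := by
        rw [pyGet_ok none (mapRange_length nn _) hi1' hi2', mapRange_getD _ _ hjn]
        rfl
      rw [bP2]
      simp only [h0, h1, if_pos ht, hEget]
      by_cases hs : hasLine true (s.map (normQ nn)) ((normQ nn q).2.1)
      · -- skipped: a later write to the same row
        have hne := nonsurvivor_ne true (P.map (normQ nn)) (s.map (normQ nn)) (normQ nn q) 0 hs
        rw [← hfullE, List.length_map, zero_add] at hne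
        rw [if_neg hne]
        have hdr : dL true nn ((q :: s).map (normQ nn)) = dL true nn (s.map (normQ nn)) := by
          rw [List.map_cons]; exact dL_cons_match_old hs
        have hdc : dL false nn ((q :: s).map (normQ nn)) = dL false nn (s.map (normQ nn)) := by
          rw [List.map_cons]; exact dL_cons_mismatch (by rw [hb1]; simp)
        have hrec := ih (P ++ [q]) (by simp [hP]) tot rs cs
          (by rw [hrs, hdr]) (by rw [hcs, hdc])
        rw [show (((P ++ [q]).length : Nat) : Int) = (P.length : Int) + 1 by simp] at hrec
        rw [hrec, List.map_cons,
          show T nn n (normQ nn q :: s.map (normQ nn)) = T nn n (s.map (normQ nn)) + 0 by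
            rw [T, hb1, if_pos hs]]
        norm_num
      · -- survivor: count it
        have hiff := survivor_iff true (P.map (normQ nn)) (s.map (normQ nn)) (normQ nn q) hb1 0
        rw [← hfullE, List.length_map, zero_add] at hiff
        rw [if_pos (hiff.mpr (Bool.eq_false_iff.mpr hs))]
        have hl3 : 3 ≤ q.length := by
          rcases hdis with h | ⟨q', hq', hsame⟩
          · exact h
          · exfalso
            have hhl := sameLine_hasLine hq' hsame
            rw [show (decide (q.getD 0 0 = 0)) = true from decide_eq_true ht] at hhl
            exact hs hhl
        have h2 := pyGetq_ok' q 2 2 (by norm_num) (by omega)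
        rw [h2]
        have hdr : dL true nn ((q :: s).map (normQ nn))
            = dL true nn (s.map (normQ nn)) + 1 := by
          rw [List.map_cons]
          exact dL_cons_match_new hb1 (Bool.eq_false_iff.mpr hs) (by exact hjn)
        have hdc : dL false nn ((q :: s).map (normQ nn)) = dL false nn (s.map (normQ nn)) := by
          rw [List.map_cons]; exact dL_cons_mismatch (by rw [hb1]; simp)
        have hrec := ih (P ++ [q]) (by simp [hP])
          (tot + q.getD 2 0 * (n - ncols + cs)) (rs + 1) cs
          (by rw [hrs, hdr]; ring) (by rw [hcs, hdc])
        rw [show (((P ++ [q]).length : Nat) : Int) = (P.length : Int) + 1 by simp] at hrec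
        rw [hrec, List.map_cons,
          show T nn n (normQ nn q :: s.map (normQ nn))
              = T nn n (s.map (normQ nn))
                + q.getD 2 0 * (n - dL false nn (s.map (normQ nn))) by
            rw [T, hb1, if_neg hs]; rfl]
        have hcs' : n - ncols + cs = n - dL false nn (s.map (normQ nn)) := by
          rw [hcs, hdc]; ring
        rw [hcs']
        norm_num
        ring
    · -- column query
      have hb1 : (normQ nn q).1 = false := by
        simp only [normQ]; exact decide_eq_false ht
      have hEget : PySem.List.pyGet? (mapRange nn (lastW false (full.map (normQ nn)) 0))
            (q.getD 1 0)
          = some (lastW false (full.map (normQ nn)) 0 ((normQ nn q).2.1)) := by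
        rw [pyGet_ok none (mapRange_length nn _) hi1' hi2', mapRange_getD _ _ hjn]
        rfl
      rw [bP2]
      simp only [h0, h1, if_neg ht, hEget]
      by_cases hs : hasLine false (s.map (normQ nn)) ((normQ nn q).2.1)
      · have hne := nonsurvivor_ne false (P.map (normQ nn)) (s.map (normQ nn)) (normQ nn q) 0 hs
        rw [← hfullE, List.length_map, zero_add] at hne
        rw [if_neg hne]
        have hdc : dL false nn ((q :: s).map (normQ nn)) = dL false nn (s.map (normQ nn)) := by
          rw [List.map_cons]; exact dL_cons_match_old hs
        have hdr : dL true nn ((q :: s).map (normQ nn)) = dL true nn (s.map (normQ nn)) := by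
          rw [List.map_cons]; exact dL_cons_mismatch (by rw [hb1]; simp)
        have hrec := ih (P ++ [q]) (by simp [hP]) tot rs cs
          (by rw [hrs, hdr]) (by rw [hcs, hdc])
        rw [show (((P ++ [q]).length : Nat) : Int) = (P.length : Int) + 1 by simp] at hrec
        rw [hrec, List.map_cons,
          show T nn n (normQ nn q :: s.map (normQ nn)) = T nn n (s.map (normQ nn)) + 0 by
            rw [T, hb1, if_pos hs]]
        norm_num
      · have hiff := survivor_iff false (P.map (normQ nn)) (s.map (normQ nn)) (normQ nn q) hb1 0
        rw [← hfullE, List.length_map, zero_add] at hiff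
        rw [if_pos (hiff.mpr (Bool.eq_false_iff.mpr hs))]
        have hl3 : 3 ≤ q.length := by
          rcases hdis with h | ⟨q', hq', hsame⟩
          · exact h
          · exfalso
            have hhl := sameLine_hasLine hq' hsame
            rw [show (decide (q.getD 0 0 = 0)) = false from decide_eq_false ht] at hhl
            exact hs hhl
        have h2 := pyGetq_ok' q 2 2 (by norm_num) (by omega)
        rw [h2]
        have hdc : dL false nn ((q :: s).map (normQ nn))
            = dL false nn (s.map (normQ nn)) + 1 := by
          rw [List.map_cons]
          exact dL_cons_match_new hb1 (Bool.eq_false_iff.mpr hs) (by exact hjn)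
        have hdr : dL true nn ((q :: s).map (normQ nn)) = dL true nn (s.map (normQ nn)) := by
          rw [List.map_cons]; exact dL_cons_mismatch (by rw [hb1]; simp)
        have hrec := ih (P ++ [q]) (by simp [hP])
          (tot + q.getD 2 0 * (n - nrows + rs)) rs (cs + 1)
          (by rw [hrs, hdr]) (by rw [hcs, hdc]; ring)
        rw [show (((P ++ [q]).length : Nat) : Int) = (P.length : Int) + 1 by simp] at hrec
        rw [hrec, List.map_cons,
          show T nn n (normQ nn q :: s.map (normQ nn))
              = T nn n (s.map (normQ nn))
                + q.getD 2 0 * (n - dL true nn (s.map (normQ nn))) by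
            rw [T, hb1, if_neg hs]; rfl]
        have hrs' : n - nrows + rs = n - dL true nn (s.map (normQ nn)) := by
          rw [hrs, hdr]; ring
        rw [hrs']
        norm_num
        ring

-- counting the non-none entries of the last-write tables
theorem countP_isSome {nn : Nat} (b : Bool) (E : List (Bool × Nat × Int)) :
    ((mapRange nn (lastW b E 0)).countP Option.isSome : Int) = dL b nn E := by
  unfold mapRange dL
  rw [List.countP_map]
  have h : List.countP (Option.isSome ∘ lastW b E 0) (List.range nn)
      = List.countP (hasLine b E) (List.range nn) := by
    apply List.countP_congr
    intro r _
    show (lastW b E 0 r).isSome = true ↔ _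
    rw [lastW_isSome]
  rw [h]

-- ===== the A loop =====
theorem aStep_row_skip {n : Int} {nn : Nat} {q : List Int}
    (hl2 : 2 ≤ q.length) (hi1 : -(nn : Int) ≤ q.getD 1 0) (hi2 : q.getD 1 0 < (nn : Int))
    (ht : q.getD 0 0 = 0) {cr cc : Int} {C R : List Bool} {tt : Int}
    (hR : R.length = nn) (hmark : R.getD (jdx nn (q.getD 1 0)) false = true) :
    aStep n (some (cr, cc, C, R, tt)) q = some (cr, cc, C, R, tt) := by
  have h0 := pyGetq_ok' q 0 0 (by norm_num) (by omega)
  have h1 := pyGetq_ok' q 1 1 (by norm_num) (by omega)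
  rw [aStep]
  simp only [h0, h1, if_pos ht, pyGet_ok false hR hi1 hi2, hmark, if_pos]

theorem aStep_row_hit {n : Int} {nn : Nat} {q : List Int}
    (hl3 : 3 ≤ q.length) (hi1 : -(nn : Int) ≤ q.getD 1 0) (hi2 : q.getD 1 0 < (nn : Int))
    (ht : q.getD 0 0 = 0) {cr cc : Int} {C R : List Bool} {tt : Int}
    (hR : R.length = nn) (hmark : R.getD (jdx nn (q.getD 1 0)) false = false) :
    aStep n (some (cr, cc, C, R, tt)) q
      = some (cr + 1, cc, C, R.set (jdx nn (q.getD 1 0)) true, tt + q.getD 2 0 * (n - cc)) := by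
  have h0 := pyGetq_ok' q 0 0 (by norm_num) (by omega)
  have h1 := pyGetq_ok' q 1 1 (by norm_num) (by omega)
  have h2 := pyGetq_ok' q 2 2 (by norm_num) (by omega)
  rw [aStep]
  simp only [h0, h1, if_pos ht, pyGet_ok false hR hi1 hi2, hmark,
    pySet_ok true hR hi1 hi2, h2, Bool.false_eq_true, if_false]

theorem aStep_col_skip {n : Int} {nn : Nat} {q : List Int}
    (hl2 : 2 ≤ q.length) (hi1 : -(nn : Int) ≤ q.getD 1 0) (hi2 : q.getD 1 0 < (nn : Int))
    (ht : ¬ q.getD 0 0 = 0) {cr cc : Int} {C R : List Bool} {tt : Int}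
    (hC : C.length = nn) (hmark : C.getD (jdx nn (q.getD 1 0)) false = true) :
    aStep n (some (cr, cc, C, R, tt)) q = some (cr, cc, C, R, tt) := by
  have h0 := pyGetq_ok' q 0 0 (by norm_num) (by omega)
  have h1 := pyGetq_ok' q 1 1 (by norm_num) (by omega)
  rw [aStep]
  simp only [h0, h1, if_neg ht, pyGet_ok false hC hi1 hi2, hmark, if_pos]

theorem aStep_col_hit {n : Int} {nn : Nat} {q : List Int}
    (hl3 : 3 ≤ q.length) (hi1 : -(nn : Int) ≤ q.getD 1 0) (hi2 : q.getD 1 0 < (nn : Int))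
    (ht : ¬ q.getD 0 0 = 0) {cr cc : Int} {C R : List Bool} {tt : Int}
    (hC : C.length = nn) (hmark : C.getD (jdx nn (q.getD 1 0)) false = false) :
    aStep n (some (cr, cc, C, R, tt)) q
      = some (cr, cc + 1, C.set (jdx nn (q.getD 1 0)) true, R, tt + q.getD 2 0 * (n - cr)) := by
  have h0 := pyGetq_ok' q 0 0 (by norm_num) (by omega)
  have h1 := pyGetq_ok' q 1 1 (by norm_num) (by omega)
  have h2 := pyGetq_ok' q 2 2 (by norm_num) (by omega)
  rw [aStep]
  simp only [h0, h1, if_neg ht, pyGet_ok false hC hi1 hi2, hmark,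
    pySet_ok true hC hi1 hi2, h2, Bool.false_eq_true, if_false]

theorem aFold {n : Int} {nn : Nat} (hn : n = (nn : Int)) (qs : List (List Int))
    (hsuf : SufOK n nn qs) :
    qs.foldr (fun q st => aStep n st q)
        (some (0, 0, List.replicate nn false, List.replicate nn false, 0))
      = some (dL true nn (qs.map (normQ nn)), dL false nn (qs.map (normQ nn)),
          mapRange nn (hasLine false (qs.map (normQ nn))),
          mapRange nn (hasLine true (qs.map (normQ nn))),
          T nn n (qs.map (normQ nn))) := by
  induction qs with
  | nil =>
    rw [List.foldr_nil]
    rw [show (([] : List (List Int)).map (normQ nn)) = [] from rfl, dL_nil, dL_nil,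
      show T nn n [] = 0 from rfl,
      (mapRange_congr (g := fun _ => false) (fun r _ => hasLine_nil false r)).trans
        (mapRange_const nn false),
      (mapRange_congr (g := fun _ => false) (fun r _ => hasLine_nil true r)).trans
        (mapRange_const nn false)]
  | cons q s ih =>
    obtain ⟨⟨hl2, hi1, hi2, hdis⟩, hsufs⟩ := hsuf
    have hi1' : -(nn : Int) ≤ q.getD 1 0 := by rw [hn] at hi1; exact hi1
    have hi2' : q.getD 1 0 < (nn : Int) := by rw [hn] at hi2; exact hi2
    have hjn : jdx nn (q.getD 1 0) < nn := jdx_lt hi1' hi2'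
    rw [List.foldr_cons, ih hsufs, List.map_cons]
    by_cases ht : q.getD 0 0 = 0
    · have hb1 : (normQ nn q).1 = true := by
        simp only [normQ]; exact decide_eq_true ht
      have hmark : (mapRange nn (hasLine true (s.map (normQ nn)))).getD
            (jdx nn (q.getD 1 0)) false
          = hasLine true (s.map (normQ nn)) ((normQ nn q).2.1) :=
        mapRange_getD _ _ hjn
      have hmapF : mapRange nn (hasLine false (s.map (normQ nn)))
          = mapRange nn (hasLine false (normQ nn q :: s.map (normQ nn))) :=
        mapRange_congr (fun r _ => by rw [hasLine_cons, hb1]; simp)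
      by_cases hs : hasLine true (s.map (normQ nn)) ((normQ nn q).2.1)
      · have hmapT : mapRange nn (hasLine true (s.map (normQ nn)))
            = mapRange nn (hasLine true (normQ nn q :: s.map (normQ nn))) :=
          mapRange_congr (fun r _ => by
            rw [hasLine_cons, hb1]
            by_cases hr : (normQ nn q).2.1 = r
            · have hsr : hasLine true (s.map (normQ nn)) r = true := by rw [← hr]; exact hs
              simp [hsr]
            · simp [show ((normQ nn q).2.1 == r) = false by
                exact beq_eq_false_iff_ne.mpr hr])
        rw [aStep_row_skip hl2 hi1' hi2' ht (mapRange_length nn _) (by rw [hmark]; exact hs)]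
        rw [dL_cons_match_old hs, dL_cons_mismatch (b := false) (by rw [hb1]; simp),
          show T nn n (normQ nn q :: s.map (normQ nn)) = T nn n (s.map (normQ nn)) by
            rw [T, hb1, if_pos hs, add_zero],
          hmapF, hmapT]
      · have hl3 : 3 ≤ q.length := by
          rcases hdis with h | ⟨q', hq', hsame⟩
          · exact h
          · exfalso
            have hhl := sameLine_hasLine hq' hsame
            rw [show (decide (q.getD 0 0 = 0)) = true from decide_eq_true ht] at hhl
            exact hs hhl
        have hmapT : (mapRange nn (hasLine true (s.map (normQ nn)))).set
              (jdx nn (q.getD 1 0)) true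
            = mapRange nn (hasLine true (normQ nn q :: s.map (normQ nn))) := by
          rw [mapRange_set _ _ hjn]
          apply mapRange_congr
          intro r _
          show (if r = jdx nn (q.getD 1 0) then true
              else hasLine true (s.map (normQ nn)) r)
            = hasLine true (normQ nn q :: s.map (normQ nn)) r
          rw [hasLine_cons, hb1]
          by_cases hr : r = jdx nn (q.getD 1 0)
          · rw [if_pos hr]
            have hbe : ((normQ nn q).2.1 == r) = true := by
              rw [show (normQ nn q).2.1 = jdx nn (q.getD 1 0) from rfl, hr]
              exact beq_self_eq_true _
            simp [hbe]
          · rw [if_neg hr]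
            have hbe : ((normQ nn q).2.1 == r) = false := by
              rw [show (normQ nn q).2.1 = jdx nn (q.getD 1 0) from rfl]
              exact beq_eq_false_iff_ne.mpr (Ne.symm hr)
            simp [hbe]
        rw [aStep_row_hit hl3 hi1' hi2' ht (mapRange_length nn _)
          (by rw [hmark]; exact Bool.eq_false_iff.mpr hs)]
        rw [dL_cons_match_new hb1 (Bool.eq_false_iff.mpr hs) (by exact hjn),
          dL_cons_mismatch (b := false) (by rw [hb1]; simp),
          show T nn n (normQ nn q :: s.map (normQ nn))
              = T nn n (s.map (normQ nn))
                + q.getD 2 0 * (n - dL false nn (s.map (normQ nn))) by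
            rw [T, hb1, if_neg hs]; rfl,
          hmapF, hmapT]
    · have hb1 : (normQ nn q).1 = false := by
        simp only [normQ]; exact decide_eq_false ht
      have hmark : (mapRange nn (hasLine false (s.map (normQ nn)))).getD
            (jdx nn (q.getD 1 0)) false
          = hasLine false (s.map (normQ nn)) ((normQ nn q).2.1) :=
        mapRange_getD _ _ hjn
      have hmapT : mapRange nn (hasLine true (s.map (normQ nn)))
          = mapRange nn (hasLine true (normQ nn q :: s.map (normQ nn))) :=
        mapRange_congr (fun r _ => by rw [hasLine_cons, hb1]; simp)
      by_cases hs : hasLine false (s.map (normQ nn)) ((normQ nn q).2.1)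
      · have hmapF : mapRange nn (hasLine false (s.map (normQ nn)))
            = mapRange nn (hasLine false (normQ nn q :: s.map (normQ nn))) :=
          mapRange_congr (fun r _ => by
            rw [hasLine_cons, hb1]
            by_cases hr : (normQ nn q).2.1 = r
            · have hsr : hasLine false (s.map (normQ nn)) r = true := by rw [← hr]; exact hs
              simp [hsr]
            · simp [show ((normQ nn q).2.1 == r) = false by
                exact beq_eq_false_iff_ne.mpr hr])
        rw [aStep_col_skip hl2 hi1' hi2' ht (mapRange_length nn _) (by rw [hmark]; exact hs)]
        rw [dL_cons_match_old hs, dL_cons_mismatch (b := true) (by rw [hb1]; simp),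
          show T nn n (normQ nn q :: s.map (normQ nn)) = T nn n (s.map (normQ nn)) by
            rw [T, hb1, if_pos hs, add_zero],
          hmapT, hmapF]
      · have hl3 : 3 ≤ q.length := by
          rcases hdis with h | ⟨q', hq', hsame⟩
          · exact h
          · exfalso
            have hhl := sameLine_hasLine hq' hsame
            rw [show (decide (q.getD 0 0 = 0)) = false from decide_eq_false ht] at hhl
            exact hs hhl
        have hmapF : (mapRange nn (hasLine false (s.map (normQ nn)))).set
              (jdx nn (q.getD 1 0)) true
            = mapRange nn (hasLine false (normQ nn q :: s.map (normQ nn))) := by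
          rw [mapRange_set _ _ hjn]
          apply mapRange_congr
          intro r _
          show (if r = jdx nn (q.getD 1 0) then true
              else hasLine false (s.map (normQ nn)) r)
            = hasLine false (normQ nn q :: s.map (normQ nn)) r
          rw [hasLine_cons, hb1]
          by_cases hr : r = jdx nn (q.getD 1 0)
          · rw [if_pos hr]
            have hbe : ((normQ nn q).2.1 == r) = true := by
              rw [show (normQ nn q).2.1 = jdx nn (q.getD 1 0) from rfl, hr]
              exact beq_self_eq_true _
            simp [hbe]
          · rw [if_neg hr]
            have hbe : ((normQ nn q).2.1 == r) = false := by
              rw [show (normQ nn q).2.1 = jdx nn (q.getD 1 0) from rfl]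
              exact beq_eq_false_iff_ne.mpr (Ne.symm hr)
            simp [hbe]
        rw [aStep_col_hit hl3 hi1' hi2' ht (mapRange_length nn _)
          (by rw [hmark]; exact Bool.eq_false_iff.mpr hs)]
        rw [dL_cons_match_new hb1 (Bool.eq_false_iff.mpr hs) (by exact hjn),
          dL_cons_mismatch (b := true) (by rw [hb1]; simp),
          show T nn n (normQ nn q :: s.map (normQ nn))
              = T nn n (s.map (normQ nn))
                + q.getD 2 0 * (n - dL true nn (s.map (normQ nn))) by
            rw [T, hb1, if_neg hs]; rfl,
          hmapT, hmapF]

theorem main_eq (n : Int) (queries : List (List Int))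
    (hpre : Pre_matrixSumQueries n queries) :
    matrixSumQueries n queries = matrixSumQueries_alt n queries := by
  have hsuf := pre_suf hpre
  by_cases hpos : 0 < n
  · set nn := n.toNat with hnn
    have hn : n = (nn : Int) := by omega
    -- A side
    have hA : matrixSumQueries n queries = T nn n (queries.map (normQ nn)) := by
      unfold matrixSumQueries
      rw [List.foldl_reverse, aFold hn queries hsuf]
    -- B side
    have hbasic := suf_basic hsuf
    have hB : matrixSumQueries_alt n queries = T nn n (queries.map (normQ nn)) := by
      unfold matrixSumQueries_alt
      rw [pass1_ok hn queries hbasic]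
      simp only []
      rw [countP_isSome true, countP_isSome false]
      have hp2 := pass2_ok hn queries hsuf _ _ rfl rfl queries [] rfl 0 0 0
        (by ring) (by ring)
      simp only [List.length_nil, Nat.cast_zero] at hp2
      rw [hp2]
      norm_num
    rw [hA, hB]
  · -- n ≤ 0: the bounds -n ≤ i < n are unsatisfiable, so queries = []
    have hq0 : queries = [] := by
      cases queries with
      | nil => rfl
      | cons q rest =>
        obtain ⟨_, h1, h2, _⟩ := hpre 0 (by simp)
        simp only [List.getD_cons_zero] at h1 h2
        omega
    subst hq0
    rfl

-- ===== VERDICT (by name: the statement is the Claim_ definition above) =====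
theorem matrixSumQueries_spec : Claim_equal_matrixSumQueries := by
  intro n queries _ hpre
  unfold Spec_matrixSumQueries
  exact main_eq n queries hpre
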